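-- pv_equiv track=rewrite | github.com/tera20318-design/adaptive-topic-learning-app | pseudo_pro_v2/src/pseudo_pro_v2/gates/decision_usable.py | _content_tokens
-- ===== SOURCE A (Python) =====
-- def _content_tokens(text: str) -> set[str]:
--     stopwords = {
--         "the",
--         "and",
--         "for",
--         "with",
--         "that",
--         "this",
--         "what",
--         "still",
--         "needs",
--         "before",
--         "after",
--         "from",
--         "into",
--         "your",
--         "their",
--         "reader",
--         "report",
--         "action",
--         "next",
--         "should",
--         "already",
--         "safe",
--         "say",
--     }
--     raw = "".join(char.lower() if char.isalnum() else " " for char in text)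
--     return {token for token in raw.split() if len(token) > 2 and token not in stopwords}
-- ===== SOURCE B (Python) =====
-- def _content_tokens(text: str) -> set[str]:
--     stopwords = {
--         "the", "and", "for", "with", "that", "this", "what", "still",
--         "needs", "before", "after", "from", "into", "your", "their",
--         "reader", "report", "action", "next", "should", "already",
--         "safe", "say",
--     }
--     tokens = set()
--     buf = []
--
--     def emit():
--         if buf:
--             token = "".join(buf)
--             if len(token) > 2 and token not in stopwords:
--                 tokens.add(token)
--
--     for char in text:
--         if char.isalnum():
--             buf.append(char.lower())
--         else:
--             emit()
--             buf = []
--     emit()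
--     return tokens
-- ===== Notes on version B (the rewrite author's own statement) =====
-- stated objective: alternative
-- what changed: Replaces A's build-a-spaced-copy-then-split-then-set-comprehension pipeline with a single character pass maintaining a current-token buffer that is emitted (filtered and added to the set) at each non-alphanumeric boundary and once at the end.
import Mathlib
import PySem

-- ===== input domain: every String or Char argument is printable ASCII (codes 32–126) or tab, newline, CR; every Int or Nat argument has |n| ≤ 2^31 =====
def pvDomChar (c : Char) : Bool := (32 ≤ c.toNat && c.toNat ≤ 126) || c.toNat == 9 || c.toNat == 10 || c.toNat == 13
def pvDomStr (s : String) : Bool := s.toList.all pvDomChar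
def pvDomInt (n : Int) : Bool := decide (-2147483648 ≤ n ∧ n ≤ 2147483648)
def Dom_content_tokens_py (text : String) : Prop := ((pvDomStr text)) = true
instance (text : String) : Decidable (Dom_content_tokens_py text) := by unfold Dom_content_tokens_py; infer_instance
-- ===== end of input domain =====

-- B rewrites A's join-then-split-then-comprehension pipeline as one pass over the characters
-- with a current-token buffer; same filters, same stopwords, return value proved equal.

-- the stopword set (only membership is used, so a list is exact)
def pvStopwords : List String :=
  ["the", "and", "for", "with", "that", "this", "what", "still",
   "needs", "before", "after", "from", "into", "your", "their",
   "reader", "report", "action", "next", "should", "already",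
   "safe", "say"]

-- ===== PORT A =====
-- raw = "".join(char.lower() if char.isalnum() else " " for char in text);
-- on this task's ASCII domain a single char's .lower() is the single char PySem.Chars.lowerChar.
def content_tokens_py (text : String) : List String :=
  let raw : String := String.ofList (text.toList.map
    (fun c => if PySem.Chars.isalnum c then PySem.Chars.lowerChar c else ' '))
  PySem.Set.ofList ((PySem.Str.split₀ raw).filter
    (fun t => decide ((2 : Int) < PySem.Str.len t) && !(pvStopwords.contains t)))

-- ===== PORT B =====
-- emit(): add the buffered token to the set if it is non-empty, long enough and not a stopword
def pvEmit (toks : PySem.Set String) (buf : List Char) : PySem.Set String :=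
  if buf = [] then toks
  else
    let token := String.ofList buf
    if decide ((2 : Int) < PySem.Str.len token) && !(pvStopwords.contains token) then
      PySem.Set.add toks token
    else toks

def content_tokens_py_alt (text : String) : List String :=
  let st := text.toList.foldl
    (fun (s : List Char × PySem.Set String) c =>
      if PySem.Chars.isalnum c then (s.1 ++ [PySem.Chars.lowerChar c], s.2)
      else ([], pvEmit s.2 s.1))
    ([], PySem.Set.empty)
  pvEmit st.2 st.1

-- ===== PRECONDITION & SPEC =====
def Spec_content_tokens_py (text : String) (out : List String) : Prop := out = content_tokens_py_alt text
instance (text : String) (out : List String) : Decidable (Spec_content_tokens_py text out) := by unfold Spec_content_tokens_py; infer_instance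

-- ===== CLAIM (what is proved, stated in full; the proofs are below) =====
def Claim_equal_content_tokens_py : Prop := ∀ (text : String), Dom_content_tokens_py text → Spec_content_tokens_py text (content_tokens_py text)

-- ===== LEMMAS AND PROOFS =====

-- the character map A applies before splitting
def pvMapChar (c : Char) : Char :=
  if PySem.Chars.isalnum c then PySem.Chars.lowerChar c else ' '

-- the per-token step of both programs, on the char-list side (tokens fed to it are non-empty)
def pvStep (toks : PySem.Set String) (t : List Char) : PySem.Set String :=
  if decide ((2 : Int) < PySem.Str.len (String.ofList t)) && !(pvStopwords.contains (String.ofList t)) then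
    PySem.Set.add toks (String.ofList t)
  else toks

-- 48 ≤ code ≤ 122 is never Python whitespace
theorem pv_isspace_false (d : Char) (h1 : 48 ≤ d.toNat) (h2 : d.toNat ≤ 122) :
    PySem.Chars.isspace d = false := by
  simp only [PySem.Chars.isspace, Bool.or_eq_false_iff, Bool.and_eq_false_iff,
    decide_eq_false_iff_not]
  omega

-- lowercasing an alphanumeric character never yields whitespace
theorem pv_alnum_lower_not_space (c : Char) (h : PySem.Chars.isalnum c = true) :
    PySem.Chars.isspace (PySem.Chars.lowerChar c) = false := by
  simp only [PySem.Chars.isalnum, PySem.Chars.isalpha, PySem.Chars.isupper, PySem.Chars.islower,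
    PySem.Chars.isdigit, Bool.or_eq_true, Bool.and_eq_true, decide_eq_true_eq] at h
  unfold PySem.Chars.lowerChar PySem.Chars.isupper
  rcases h with (⟨h1, h2⟩ | ⟨h1, h2⟩) | ⟨h1, h2⟩
  · have h1' : 65 ≤ c.toNat := h1
    have h2' : c.toNat ≤ 90 := h2
    rw [if_pos (by simp only [Bool.and_eq_true, decide_eq_true_eq]; exact ⟨h1, h2⟩)]
    have hv : (c.toNat + 32).isValidChar := Or.inl (by omega)
    unfold Char.ofNat
    rw [dif_pos hv]
    exact pv_isspace_false _ (by rw [Char.toNat_ofNatAux hv]; omega)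
      (by rw [Char.toNat_ofNatAux hv]; omega)
  · have h1' : 97 ≤ c.toNat := h1
    have h2' : c.toNat ≤ 122 := h2
    rw [if_neg (by simp only [Bool.and_eq_true, decide_eq_true_eq, not_and]; intro hA hZ
                   exact absurd (show c.toNat ≤ 90 from hZ) (by omega))]
    exact pv_isspace_false _ (by omega) (by omega)
  · have h1' : 48 ≤ c.toNat := h1
    have h2' : c.toNat ≤ 57 := h2
    rw [if_neg (by simp only [Bool.and_eq_true, decide_eq_true_eq, not_and]; intro hA hZ
                   exact absurd (show 65 ≤ c.toNat from hA) (by omega))]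
    exact pv_isspace_false _ (by omega) (by omega)

-- split₀'s worker emits its accumulated tokens in front of what it still produces
theorem pv_go_append (cs : List Char) : ∀ (cur : List Char) (acc : List (List Char)),
    PySem.Chars.split₀.go cs cur acc = acc.reverse ++ PySem.Chars.split₀.go cs cur [] := by
  induction cs with
  | nil => intro cur acc; simp [PySem.Chars.split₀.go]; split <;> simp
  | cons c rest ih =>
    intro cur acc
    simp only [PySem.Chars.split₀.go]
    split
    · split
      · exact ih [] acc
      · rw [ih [] (cur.reverse :: acc), ih [] [cur.reverse]]
        simp
    · exact ih (c :: cur) acc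

-- the invariant of B's scan: from any buffer/set state it computes exactly
-- the token fold over split₀'s worker run on the mapped remaining characters
theorem pv_main (cs : List Char) : ∀ (buf : List Char) (toks : PySem.Set String),
    pvEmit
      (cs.foldl (fun (s : List Char × PySem.Set String) c =>
        if PySem.Chars.isalnum c then (s.1 ++ [PySem.Chars.lowerChar c], s.2)
        else ([], pvEmit s.2 s.1)) (buf, toks)).2
      (cs.foldl (fun (s : List Char × PySem.Set String) c =>
        if PySem.Chars.isalnum c then (s.1 ++ [PySem.Chars.lowerChar c], s.2)
        else ([], pvEmit s.2 s.1)) (buf, toks)).1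
    = (PySem.Chars.split₀.go (cs.map pvMapChar) buf.reverse []).foldl pvStep toks := by
  induction cs with
  | nil =>
    intro buf toks
    simp only [List.foldl_nil, List.map_nil, PySem.Chars.split₀.go]
    by_cases hb : buf = []
    · simp [hb, pvEmit]
    · simp [hb, List.isEmpty_iff, pvEmit, pvStep]
  | cons c rest ih =>
    intro buf toks
    simp only [List.foldl_cons, List.map_cons]
    by_cases ha : PySem.Chars.isalnum c = true
    · rw [if_pos ha]
      have hm : pvMapChar c = PySem.Chars.lowerChar c := if_pos ha
      rw [hm]
      rw [ih (buf ++ [PySem.Chars.lowerChar c]) toks]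
      simp only [PySem.Chars.split₀.go, pv_alnum_lower_not_space c ha]
      simp
    · rw [if_neg ha]
      have hm : pvMapChar c = ' ' := if_neg ha
      rw [hm]
      have hsp : PySem.Chars.isspace ' ' = true := by decide
      by_cases hb : buf = []
      · subst hb
        rw [ih [] (pvEmit toks [])]
        simp only [PySem.Chars.split₀.go, hsp, if_pos, List.reverse_nil, List.isEmpty_nil]
        simp [pvEmit]
      · rw [ih [] (pvEmit toks buf)]
        simp only [PySem.Chars.split₀.go, hsp, if_pos]
        rw [if_neg (by simp [List.isEmpty_iff, hb])]
        simp only [List.reverse_reverse, List.reverse_nil]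
        rw [pv_go_append (rest.map pvMapChar) [] [buf]]
        simp only [List.reverse_cons, List.reverse_nil, List.nil_append,
          List.foldl_append, List.foldl_cons, List.foldl_nil]
        congr 1
        simp [pvEmit, pvStep, hb]

-- ===== VERDICT (by name: the statement is the Claim_ definition above) =====
theorem content_tokens_py_spec : Claim_equal_content_tokens_py := by
  intro text _
  unfold Spec_content_tokens_py content_tokens_py content_tokens_py_alt
  rw [pv_main text.toList [] PySem.Set.empty]
  simp only [List.reverse_nil]
  rw [PySem.Set.ofList_eq_foldl,
    ← PySem.List.foldl_if_eq_foldl_filter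
      (p := fun t => decide ((2 : Int) < PySem.Str.len t) && !(pvStopwords.contains t))
      (f := PySem.Set.add)]
  have hsplit := PySem.Str.split₀_map_toList
    (String.ofList (text.toList.map (fun c =>
      if PySem.Chars.isalnum c then PySem.Chars.lowerChar c else ' ')))
  rw [String.toList_ofList] at hsplit
  rw [show PySem.Chars.split₀.go (text.toList.map pvMapChar) [] []
        = PySem.Chars.split₀ (text.toList.map pvMapChar) from rfl]
  rw [show text.toList.map pvMapChar
        = text.toList.map (fun c => if PySem.Chars.isalnum c then PySem.Chars.lowerChar c else ' ')
      from rfl]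
  rw [← hsplit, List.foldl_map]
  simp only [pvStep, String.ofList_toList]
  rfl
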